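-- pv_equiv track=rewrite | github.com/lorenzoemer/Encoder-Based-Models-vs-Large-Language-Models-for-Patent-Classification | zero_shot_rag.py | group_allowed_labels_hierarchically
-- ===== SOURCE A (Python) =====
-- from typing import List, Dict, Tuple, Optional, Any
--
-- def normalize_cpc_label(code: str) -> str:
--     if not code:
--         return ""
--     c = str(code).strip().upper()
--     if not c:
--         return ""
--     c = c.split("/")[0]
--     if len(c) >= 4 and c[0].isalpha() and c[1:3].isdigit():
--         return c[:4]
--     return c[:4]
--
-- def group_allowed_labels_hierarchically(allowed_labels: List[str], cpc_desc_map: Dict[str, str]) -> str: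
--     from collections import defaultdict
--
--     tree = defaultdict(lambda: defaultdict(list))
--     for raw_code in allowed_labels:
--         code = normalize_cpc_label(raw_code)
--         if not code:
--             continue
--         section = code[0]
--         cclass = code[:3]
--         tree[section][cclass].append(code)
--
--     lines: List[str] = []
--     for section in sorted(tree.keys()):
--         lines.append(f"Section {section}:")
--         for cclass in sorted(tree[section].keys()):
--             lines.append(f"  Class {cclass}:")
--             for code in sorted(set(tree[section][cclass])):
--                 desc = (cpc_desc_map.get(code, "") or "").strip()
--                 if len(desc) > 220:
--                     desc = desc[:220].rstrip() + "…"
--                 lines.append(f"    - {code}" + (f" — {desc}" if desc else ""))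
--         lines.append("")
--     return "\n".join(lines).strip()
-- ===== SOURCE B (Python) =====
-- from typing import List, Dict
--
-- def group_allowed_labels_hierarchically(allowed_labels: List[str], cpc_desc_map: Dict[str, str]) -> str:
--     # Flat pipeline: normalize -> dedup via a set -> one global sort -> single scan
--     # with sentinel strings for the current section/class headers.
--     codes = sorted({c for c in (str(x).strip().upper().split("/")[0][:4] for x in allowed_labels) if c})
--     lines: List[str] = []
--     cur_section = ""
--     cur_class = ""
--     for code in codes:
--         if code[:1] != cur_section:
--             if lines:
--                 lines.append("")
--             cur_section = code[:1]
--             cur_class = ""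
--             lines.append(f"Section {cur_section}:")
--         if code[:3] != cur_class:
--             cur_class = code[:3]
--             lines.append(f"  Class {cur_class}:")
--         desc = (cpc_desc_map.get(code, "") or "").strip()
--         if len(desc) > 220:
--             desc = desc[:220].rstrip() + "…"
--         lines.append(f"    - {code}" + (f" — {desc}" if desc else ""))
--     return "\n".join(lines).strip()
-- ===== Notes on version B (the rewrite author's own statement) =====
-- stated objective: alternative
-- what changed: B replaces A's defaultdict-of-defaultdict tree plus three levels of per-group sorting with one global sort of the deduplicated normalized codes followed by a single linear scan that emits section/class headers when the 1- and 3-character prefixes change.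
import Mathlib
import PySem

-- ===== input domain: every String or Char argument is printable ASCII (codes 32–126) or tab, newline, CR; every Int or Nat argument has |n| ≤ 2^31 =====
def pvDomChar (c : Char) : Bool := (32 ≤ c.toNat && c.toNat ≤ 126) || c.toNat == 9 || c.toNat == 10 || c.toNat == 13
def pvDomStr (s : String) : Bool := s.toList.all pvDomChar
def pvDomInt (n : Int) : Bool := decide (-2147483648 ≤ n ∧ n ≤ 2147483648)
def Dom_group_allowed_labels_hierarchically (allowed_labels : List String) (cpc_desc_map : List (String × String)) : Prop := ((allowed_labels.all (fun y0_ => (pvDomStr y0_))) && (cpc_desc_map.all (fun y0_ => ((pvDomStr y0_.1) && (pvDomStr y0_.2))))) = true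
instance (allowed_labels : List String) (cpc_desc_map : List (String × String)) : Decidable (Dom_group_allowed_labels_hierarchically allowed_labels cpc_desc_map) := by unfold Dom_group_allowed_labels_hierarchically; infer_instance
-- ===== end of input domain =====

-- B re-implements A's defaultdict tree + per-level sorting as one global sort of the deduplicated
-- normalized codes followed by a single sentinel-tracking scan (alternative decomposition, same cost).

-- ===== PORT A =====
-- A-side helper: literal transliteration of normalize_cpc_label.
def normalize_cpc_label (code : String) : String :=
  if code = "" then ""          -- `if not code`
  else
    let c := PySem.Str.upper (PySem.Str.strip code)
    if c = "" then ""
    else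
      -- c = c.split("/")[0]; split with a non-empty separator always returns a
      -- non-empty list, so index 0 is its head (the `getD` defaults are unreachable)
      let c := (((PySem.Str.split? c "/").getD []).getD 0 "")
      if 4 <= PySem.Str.len c
          && ((PySem.Str.pyGet? c 0).map PySem.Chars.isalpha).getD false
          && PySem.Str.strIsdigit (PySem.Str.slice c (some 1) (some 3)) then
        PySem.Str.slice c none (some 4)
      else
        PySem.Str.slice c none (some 4)

def group_allowed_labels_hierarchically (allowed_labels : List String) (cpc_desc_map : List (String × String)) : String :=
  let tree : PySem.Dict String (PySem.Dict String (List String)) :=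
    allowed_labels.foldl (fun tree raw_code =>
      let code := normalize_cpc_label raw_code
      if code = "" then tree
      else
        -- section = code[0] (a one-character string; code is non-empty here)
        let sect := (match PySem.Str.pyGet? code 0 with | some ch => String.ofList [ch] | none => "")
        let cclass := PySem.Str.slice code none (some 3)
        -- tree[section][cclass].append(code)  (defaultdict semantics)
        tree.modify sect PySem.Dict.empty (fun inner => inner.modify cclass [] (fun l => l ++ [code]))) PySem.Dict.empty
  let lines : List String :=
    (PySem.List.sorted tree.keys (fun x => x) false).foldl (fun lines sect =>
      let lines := lines ++ ["Section " ++ sect ++ ":"]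
      let inner := tree.getD sect PySem.Dict.empty
      let lines := (PySem.List.sorted inner.keys (fun x => x) false).foldl (fun lines cclass =>
        let lines := lines ++ ["  Class " ++ cclass ++ ":"]
        (PySem.List.sorted (PySem.Set.ofList (inner.getD cclass [])) (fun x => x) false).foldl (fun lines code =>
          let d0 := (PySem.Dict.mk cpc_desc_map).getD code ""    -- cpc_desc_map.get(code, "")
          let desc := PySem.Str.strip (if d0 = "" then "" else d0)  -- (… or "").strip()
          let desc := if 220 < PySem.Str.len desc then PySem.Str.rstrip (PySem.Str.slice desc none (some 220)) ++ "…" else desc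
          lines ++ ["    - " ++ code ++ (if desc ≠ "" then " — " ++ desc else "")]) lines) lines
      lines ++ [""]) []
  PySem.Str.strip (PySem.Str.join "
" lines)

-- ===== PORT B =====
def group_allowed_labels_hierarchically_alt (allowed_labels : List String) (cpc_desc_map : List (String × String)) : String :=
  -- codes = sorted({str(x).strip().upper().split("/")[0][:4] for x in allowed_labels if …})
  let codes :=
    PySem.List.sorted
      (PySem.Set.ofList ((allowed_labels.map (fun x =>
        PySem.Str.slice (((PySem.Str.split? (PySem.Str.upper (PySem.Str.strip x)) "/").getD []).getD 0 "") none (some 4))).filter (fun c => c ≠ "")))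
      (fun x => x) false
  -- single scan with sentinel strings for the current section / class
  let st := codes.foldl (fun (st : List String × String × String) code =>
      let lines := st.1
      let cur_section := st.2.1
      let cur_class := st.2.2
      let st1 : List String × String × String :=
        if PySem.Str.slice code none (some 1) ≠ cur_section then
          let lines := if lines ≠ [] then lines ++ [""] else lines
          (lines ++ ["Section " ++ PySem.Str.slice code none (some 1) ++ ":"], PySem.Str.slice code none (some 1), "")
        else (lines, cur_section, cur_class)
      let st2 : List String × String × String :=
        if PySem.Str.slice code none (some 3) ≠ st1.2.2 then
          (st1.1 ++ ["  Class " ++ PySem.Str.slice code none (some 3) ++ ":"], st1.2.1, PySem.Str.slice code none (some 3))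
        else st1
      let d0 := (PySem.Dict.mk cpc_desc_map).getD code ""
      let desc := PySem.Str.strip (if d0 = "" then "" else d0)
      let desc := if 220 < PySem.Str.len desc then PySem.Str.rstrip (PySem.Str.slice desc none (some 220)) ++ "…" else desc
      (st2.1 ++ ["    - " ++ code ++ (if desc ≠ "" then " — " ++ desc else "")], st2.2.1, st2.2.2))
    ([], "", "")
  PySem.Str.strip (PySem.Str.join "
" st.1)

-- ===== PRECONDITION & SPEC =====
def Spec_group_allowed_labels_hierarchically (allowed_labels : List String) (cpc_desc_map : List (String × String)) (out : String) : Prop := out = group_allowed_labels_hierarchically_alt allowed_labels cpc_desc_map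
instance (allowed_labels : List String) (cpc_desc_map : List (String × String)) (out : String) : Decidable (Spec_group_allowed_labels_hierarchically allowed_labels cpc_desc_map out) := by unfold Spec_group_allowed_labels_hierarchically; infer_instance

-- ===== CLAIM (what is proved, stated in full; the proofs are below) =====
def Claim_equal_group_allowed_labels_hierarchically : Prop := ∀ (allowed_labels : List String) (cpc_desc_map : List (String × String)), Dom_group_allowed_labels_hierarchically allowed_labels cpc_desc_map → Spec_group_allowed_labels_hierarchically allowed_labels cpc_desc_map (group_allowed_labels_hierarchically allowed_labels cpc_desc_map)

-- ===== LEMMAS AND PROOFS =====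

-- Proof-side helper definitions (used only by the proofs below).

-- B's normalization chain (also the collapsed form of A's normalize_cpc_label).
def nrmStr (x : String) : String :=
  PySem.Str.slice (((PySem.Str.split? (PySem.Str.upper (PySem.Str.strip x)) "/").getD []).getD 0 "") none (some 4)

def sec1 (c : String) : String := PySem.Str.slice c none (some 1)
def cls3 (c : String) : String := PySem.Str.slice c none (some 3)
def secAKey (c : String) : String := match PySem.Str.pyGet? c 0 with | some ch => String.ofList [ch] | none => ""

def entryLine (m : List (String × String)) (code : String) : String :=
  let d0 := (PySem.Dict.mk m).getD code ""
  let desc := PySem.Str.strip (if d0 = "" then "" else d0)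
  let desc := if 220 < PySem.Str.len desc then PySem.Str.rstrip (PySem.Str.slice desc none (some 220)) ++ "…" else desc
  "    - " ++ code ++ (if desc ≠ "" then " — " ++ desc else "")

-- B's scan step, named (identical to the lambda inside the port of B).
def scanStep (m : List (String × String)) (st : List String × String × String) (code : String) :
    List String × String × String :=
  let lines := st.1
  let cur_section := st.2.1
  let cur_class := st.2.2
  let st1 : List String × String × String :=
    if PySem.Str.slice code none (some 1) ≠ cur_section then
      let lines := if lines ≠ [] then lines ++ [""] else lines
      (lines ++ ["Section " ++ PySem.Str.slice code none (some 1) ++ ":"], PySem.Str.slice code none (some 1), "")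
    else (lines, cur_section, cur_class)
  let st2 : List String × String × String :=
    if PySem.Str.slice code none (some 3) ≠ st1.2.2 then
      (st1.1 ++ ["  Class " ++ PySem.Str.slice code none (some 3) ++ ":"], st1.2.1, PySem.Str.slice code none (some 3))
    else st1
  let d0 := (PySem.Dict.mk m).getD code ""
  let desc := PySem.Str.strip (if d0 = "" then "" else d0)
  let desc := if 220 < PySem.Str.len desc then PySem.Str.rstrip (PySem.Str.slice desc none (some 220)) ++ "…" else desc
  (st2.1 ++ ["    - " ++ code ++ (if desc ≠ "" then " — " ++ desc else "")], st2.2.1, st2.2.2)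

-- The hierarchical blocks of a (strictly sorted) flat code list.
def codeLines (m : List (String × String)) (g : List String) : List String := g.map (entryLine m)

def classBlocks (m : List (String × String)) : List String → List String
  | [] => []
  | code :: rest =>
      ("  Class " ++ cls3 code ++ ":") ::
        (codeLines m (code :: rest.takeWhile (fun x => cls3 x == cls3 code))
          ++ classBlocks m (rest.dropWhile (fun x => cls3 x == cls3 code)))
  termination_by l => l.length
  decreasing_by
    exact Nat.lt_succ_of_le (List.length_dropWhile_le _ _)

def secBlocks (m : List (String × String)) : List String → List (List String)
  | [] => []
  | code :: rest =>
      (("Section " ++ sec1 code ++ ":") ::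
          classBlocks m (code :: rest.takeWhile (fun x => sec1 x == sec1 code)))
        :: secBlocks m (rest.dropWhile (fun x => sec1 x == sec1 code))
  termination_by l => l.length
  decreasing_by
    exact Nat.lt_succ_of_le (List.length_dropWhile_le _ _)

-- "" separated / "" terminated concatenations of the blocks.
def sepJoin : List (List String) → List String
  | [] => []
  | [b] => b
  | b :: b' :: bs => b ++ [""] ++ sepJoin (b' :: bs)

-- A's trees, named.
def innerStep (d : PySem.Dict String (List String)) (c : String) : PySem.Dict String (List String) :=
  d.modify (cls3 c) [] (fun l => l ++ [c])

def treeStep (t : PySem.Dict String (PySem.Dict String (List String))) (code : String) :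
    PySem.Dict String (PySem.Dict String (List String)) :=
  t.modify (secAKey code) PySem.Dict.empty (fun inner => inner.modify (cls3 code) [] (fun l => l ++ [code]))

theorem str_eq_iff_toList (s t : String) : s = t ↔ s.toList = t.toList := by
  constructor
  · intro h; rw [h]
  · exact String.toList_injective
theorem toList_sec1 (c : String) : (sec1 c).toList = c.toList.take 1 := by
  rw [sec1, PySem.Str.toList_slice]; simp [pysem]
theorem toList_cls3 (c : String) : (cls3 c).toList = c.toList.take 3 := by
  rw [cls3, PySem.Str.toList_slice]; simp [pysem]
theorem sec1_ne_empty {c : String} (h : c ≠ "") : sec1 c ≠ "" := by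
  intro hc
  rw [str_eq_iff_toList, toList_sec1] at hc
  apply h
  rw [str_eq_iff_toList]
  cases hl : c.toList with
  | nil => rfl
  | cons a t => rw [hl] at hc; simp at hc
theorem secA_eq_sec1 {c : String} (h : c ≠ "") : secAKey c = sec1 c := by
  rw [Ne, str_eq_iff_toList] at h
  rw [str_eq_iff_toList]
  cases hl : c.toList with
  | nil => simp [hl] at h
  | cons a t =>
    rw [secAKey, toList_sec1, hl]
    have : PySem.Str.pyGet? c 0 = some a := by
      simp [PySem.Str.pyGet?, PySem.List.pyGet?, PySem.List.pyIdx?, hl]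
    rw [this]
    simp
theorem take_lt_or_eq {a b : List Char} (h : List.Lex (· < ·) a b) :
    ∀ (n : Nat), List.Lex (· < ·) (a.take n) (b.take n) ∨ a.take n = b.take n := by
  induction h with
  | nil =>
    intro n
    cases n with
    | zero => right; rfl
    | succ k => left; exact List.Lex.nil
  | @rel a' l1 b' l2 hr =>
    intro n
    cases n with
    | zero => right; rfl
    | succ k => left; simp only [List.take_succ_cons]; exact List.Lex.rel hr
  | @cons a' l1 l2 hlex ih =>
    intro n
    cases n with
    | zero => right; rfl
    | succ k =>
      simp only [List.take_succ_cons]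
      rcases ih k with h1 | h2
      · left; exact List.Lex.cons h1
      · right; rw [h2]
theorem str_take_mono {a b : String} (h : a < b) (n : Nat) :
    String.ofList (a.toList.take n) ≤ String.ofList (b.toList.take n) := by
  rw [String.lt_iff_toList_lt] at h
  replace h := List.lex_lt.mpr h
  rcases take_lt_or_eq h n with h1 | h2
  · apply le_of_lt
    rw [String.lt_iff_toList_lt]
    apply List.lex_lt.mp
    simpa using h1
  · apply le_of_eq
    rw [str_eq_iff_toList]
    simpa using h2
theorem sec1_mono {a b : String} (h : a < b) : sec1 a ≤ sec1 b := by
  have := str_take_mono h 1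
  have e1 : String.ofList (a.toList.take 1) = sec1 a := by
    rw [str_eq_iff_toList, toList_sec1]; simp
  have e2 : String.ofList (b.toList.take 1) = sec1 b := by
    rw [str_eq_iff_toList, toList_sec1]; simp
  rwa [e1, e2] at this
theorem cls3_mono {a b : String} (h : a < b) : cls3 a ≤ cls3 b := by
  have := str_take_mono h 3
  have e1 : String.ofList (a.toList.take 3) = cls3 a := by
    rw [str_eq_iff_toList, toList_cls3]; simp
  have e2 : String.ofList (b.toList.take 3) = cls3 b := by
    rw [str_eq_iff_toList, toList_cls3]; simp
  rwa [e1, e2] at this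
theorem normalize_eq_nrm (x : String) : normalize_cpc_label x = nrmStr x := by
  simp only [normalize_cpc_label, nrmStr]
  split_ifs with h1 h2 h3
  · rw [h1]; decide
  · rw [h2]; decide
  · rfl
  · rfl
theorem foldl_norm_filter {γ : Type} (step : γ → String → γ) :
    ∀ (xs : List String) (acc : γ),
      xs.foldl (fun t r =>
        if nrmStr r = "" then t else step t (nrmStr r)) acc
      = ((xs.map nrmStr).filter (fun c => c ≠ "")).foldl step acc := by
  intro xs
  induction xs with
  | nil => intro acc; simp
  | cons x t ih =>
    intro acc
    by_cases h : nrmStr x = ""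
    · simp [h, ih]
    · simp [h, ih]
theorem tree_getD (s : String) :
    ∀ (L : List String) (d : PySem.Dict String (PySem.Dict String (List String))),
      (L.foldl treeStep d).getD s PySem.Dict.empty
        = ((L.filter (fun c => secAKey c == s)).foldl innerStep (d.getD s PySem.Dict.empty)) := by
  intro L
  induction L with
  | nil => intro d; simp
  | cons x t ih =>
    intro d
    simp only [List.foldl_cons, List.filter_cons]
    rw [ih]
    have hg : (treeStep d x).getD s PySem.Dict.empty
        = if s = secAKey x then innerStep (d.getD (secAKey x) PySem.Dict.empty) x
          else d.getD s PySem.Dict.empty := by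
      rw [treeStep, PySem.Dict.getD_modify]
      rfl
    by_cases h : s = secAKey x
    · have hb : (secAKey x == s) = true := beq_iff_eq.mpr h.symm
      rw [hg, if_pos h, hb, if_pos rfl, List.foldl_cons, h]
    · have hb : (secAKey x == s) = false := beq_eq_false_iff_ne.mpr (fun he => h he.symm)
      rw [hg, if_neg h, hb]
      simp
theorem inner_getD (c : String) (M : List String) :
    ∀ (d : PySem.Dict String (List String)),
      (M.foldl innerStep d).getD c [] = d.getD c [] ++ (M.filter (fun x => cls3 x == c)) := by
  intro d
  have h1 : M.foldl innerStep d
      = (M.map (fun x => (cls3 x, x))).foldl (fun d (p : String × String) => d.modify p.1 [] (fun l => l ++ [p.2])) d := by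
    rw [List.foldl_map]
    rfl
  rw [h1, PySem.Dict.getD_foldl_modify_append, List.filter_map]
  simp [List.map_map, Function.comp_def]
theorem tree_keys (L : List String) :
    (L.foldl treeStep PySem.Dict.empty).keys = PySem.Set.ofList (L.map secAKey) := by
  have := PySem.Dict.keys_foldl_modify_key L secAKey PySem.Dict.empty
    (fun _ code inner => inner.modify (cls3 code) [] (fun l => l ++ [code])) PySem.Dict.empty
  rw [show (L.foldl treeStep PySem.Dict.empty) = (List.foldl (fun d x =>
      d.modify (secAKey x) PySem.Dict.empty
        ((fun _ code inner => inner.modify (cls3 code) [] (fun l => l ++ [code])) d x)) PySem.Dict.empty L) from rfl]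
  rw [this]
  simp [pysem, PySem.Set.ofList, List.foldl_map]
theorem inner_keys (M : List String) :
    (M.foldl innerStep PySem.Dict.empty).keys = PySem.Set.ofList (M.map cls3) := by
  have := PySem.Dict.keys_foldl_modify_key M cls3 ([] : List String)
    (fun _ code l => l ++ [code]) PySem.Dict.empty
  rw [show (M.foldl innerStep PySem.Dict.empty) = (List.foldl (fun d x =>
      d.modify (cls3 x) [] ((fun _ code l => l ++ [code]) d x)) PySem.Dict.empty M) from rfl]
  rw [this]
  simp [pysem, PySem.Set.ofList, List.foldl_map]
theorem sorted_ofList_eq {xs ys : List String} (hnd : ys.Nodup)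
    (hpw : ys.Pairwise (· < ·)) (hmem : ∀ a, a ∈ xs ↔ a ∈ ys) :
    PySem.List.sorted (PySem.Set.ofList xs) (fun x => x) false = ys := by
  apply PySem.List.sorted_eq_of_perm_of_pairwise_lt
  · exact (List.perm_ext_iff_of_nodup hnd (PySem.Set.nodup_ofList xs)).mpr
      (fun a => ((hmem a).symm.trans (PySem.Set.mem_ofList xs a).symm))
  · exact hpw
theorem sorted_ofList_congr {xs ys : List String} (hmem : ∀ a, a ∈ xs ↔ a ∈ ys) :
    PySem.List.sorted (PySem.Set.ofList xs) (fun x => x) false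
      = PySem.List.sorted (PySem.Set.ofList ys) (fun x => x) false := by
  apply PySem.List.sorted_eq_sorted_of_perm
  · exact fun a b h => h
  · exact (List.perm_ext_iff_of_nodup (PySem.Set.nodup_ofList xs) (PySem.Set.nodup_ofList ys)).mpr
      (fun a => ((PySem.Set.mem_ofList xs a).trans ((hmem a).trans (PySem.Set.mem_ofList ys a).symm)))
theorem cls3_ne_empty {c : String} (h : c ≠ "") : cls3 c ≠ "" := by
  intro hc
  rw [str_eq_iff_toList, toList_cls3] at hc
  apply h
  rw [str_eq_iff_toList]
  cases hl : c.toList with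
  | nil => rfl
  | cons a t => rw [hl] at hc; simp at hc
theorem rest_gt {f : String → String} (hmono : ∀ {a b : String}, a < b → f a ≤ f b)
    {code : String} {rest : List String} (hpw : (code :: rest).Pairwise (· < ·)) :
    ∀ x ∈ rest.dropWhile (fun x => f x == f code), f code < f x := by
  intro x hx
  have hsub : (rest.dropWhile (fun x => f x == f code)).Sublist rest := List.dropWhile_sublist _
  have hcx : ∀ y ∈ rest, code < y := (List.pairwise_cons.mp hpw).1
  cases hr : rest.dropWhile (fun x => f x == f code) with
  | nil => rw [hr] at hx; simp at hx
  | cons h0 t0 =>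
    have hp0 : (f h0 == f code) = false := by
      have := List.head?_dropWhile_not (fun x => f x == f code) rest
      rw [hr] at this
      simpa using this
    have hne0 : f h0 ≠ f code := by simpa using hp0
    have h0r : h0 ∈ rest := hsub.mem (by rw [hr]; exact List.mem_cons_self)
    have hle0 : f code ≤ f h0 := hmono (hcx h0 h0r)
    have hlt0 : f code < f h0 := lt_of_le_of_ne hle0 (fun he => hne0 he.symm)
    rw [hr] at hx
    rcases List.mem_cons.mp hx with h | h
    · rw [h]; exact hlt0
    · have hpwr : (h0 :: t0).Pairwise (· < ·) := by
        rw [← hr]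
        exact List.Pairwise.sublist (List.dropWhile_sublist _) hpw.of_cons
      have : h0 < x := (List.pairwise_cons.mp hpwr).1 x h
      exact lt_of_lt_of_le hlt0 (hmono this)
theorem filter_head_group {f : String → String} (hmono : ∀ {a b : String}, a < b → f a ≤ f b)
    {code : String} {rest : List String} (hpw : (code :: rest).Pairwise (· < ·)) :
    (code :: rest).filter (fun x => f x == f code)
      = code :: rest.takeWhile (fun x => f x == f code) := by
  rw [List.filter_cons, beq_self_eq_true, if_pos rfl]
  congr 1
  conv_lhs => rw [← List.takeWhile_append_dropWhile (p := fun x => f x == f code) (l := rest)]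
  rw [List.filter_append]
  rw [List.filter_eq_self.mpr (fun a ha => List.mem_takeWhile_imp (p := fun x => f x == f code) ha)]
  rw [List.filter_eq_nil_iff.mpr, List.append_nil]
  intro a ha
  simp only [beq_iff_eq]
  exact fun he => absurd he (ne_of_gt (rest_gt hmono hpw a ha))

theorem filter_rest {f : String → String}
    {code : String} {rest : List String}
    {s : String} (hs : s ≠ f code) :
    (code :: rest).filter (fun x => f x == s)
      = (rest.dropWhile (fun x => f x == f code)).filter (fun x => f x == s) := by
  rw [List.filter_cons, if_neg (by simp; exact fun he => hs he.symm)]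
  conv_lhs => rw [← List.takeWhile_append_dropWhile (p := fun x => f x == f code) (l := rest)]
  rw [List.filter_append]
  rw [List.filter_eq_nil_iff.mpr, List.nil_append]
  intro a ha
  have hfa : f a = f code := beq_iff_eq.mp (List.mem_takeWhile_imp (p := fun x => f x == f code) ha)
  simp only [beq_iff_eq, hfa]
  exact fun he => hs he.symm

theorem secs_cons {f : String → String} (hmono : ∀ {a b : String}, a < b → f a ≤ f b)
    {code : String} {rest : List String} (hpw : (code :: rest).Pairwise (· < ·)) :
    PySem.List.sorted (PySem.Set.ofList ((code :: rest).map f)) (fun x => x) false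
      = f code :: PySem.List.sorted
          (PySem.Set.ofList ((rest.dropWhile (fun x => f x == f code)).map f)) (fun x => x) false := by
  have hmemtail : ∀ a : String, (a ∈ PySem.List.sorted
      (PySem.Set.ofList ((rest.dropWhile (fun x => f x == f code)).map f)) (fun x => x) false)
      ↔ a ∈ (rest.dropWhile (fun x => f x == f code)).map f := by
    intro a
    rw [PySem.List.mem_sorted, PySem.Set.mem_ofList]
  have hnotmem : f code ∉ PySem.List.sorted
      (PySem.Set.ofList ((rest.dropWhile (fun x => f x == f code)).map f)) (fun x => x) false := by
    intro hmem
    rw [hmemtail] at hmem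
    rcases List.mem_map.mp hmem with ⟨x, hx, hfx⟩
    exact absurd hfx (ne_of_gt (rest_gt hmono hpw x hx))
  apply sorted_ofList_eq
  · rw [List.nodup_cons]
    refine ⟨hnotmem, ?_⟩
    have hperm := PySem.List.sorted_perm
      (PySem.Set.ofList ((rest.dropWhile (fun x => f x == f code)).map f) : List String) (fun x : String => x) false
    exact hperm.symm.nodup (PySem.Set.nodup_ofList _)
  · rw [List.pairwise_cons]
    refine ⟨?_, PySem.List.sorted_ofList_pairwise_lt _⟩
    intro a hmem
    rw [hmemtail] at hmem
    rcases List.mem_map.mp hmem with ⟨x, hx, hfx⟩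
    rw [← hfx]
    exact rest_gt hmono hpw x hx
  · intro a
    rw [List.mem_cons, hmemtail]
    constructor
    · intro hmem
      rcases List.mem_map.mp hmem with ⟨x, hx, hfx⟩
      rcases List.mem_cons.mp hx with h | h
      · left; rw [← hfx, h]
      · conv at h => rw [← List.takeWhile_append_dropWhile (p := fun x => f x == f code) (l := rest)]
        rcases List.mem_append.mp h with h2 | h2
        · left
          rw [← hfx]
          exact beq_iff_eq.mp (List.mem_takeWhile_imp (p := fun x => f x == f code) h2)
        · right
          exact List.mem_map.mpr ⟨x, h2, hfx⟩
    · intro hmem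
      rcases hmem with h | h
      · rw [h]; exact List.mem_map.mpr ⟨code, List.mem_cons_self, rfl⟩
      · rcases List.mem_map.mp h with ⟨x, hx, hfx⟩
        exact List.mem_map.mpr ⟨x, List.mem_cons_of_mem _ ((List.dropWhile_sublist _).mem hx), hfx⟩
theorem aClassFold (m : List (String × String)) :
    ∀ (n : Nat) (g : List String), g.length ≤ n → g.Pairwise (· < ·) → ∀ (lines : List String),
      (PySem.List.sorted (PySem.Set.ofList (g.map cls3)) (fun x => x) false).foldl
        (fun lines c =>
          (PySem.List.sorted (PySem.Set.ofList (g.filter (fun x => cls3 x == c))) (fun x => x) false).foldl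
            (fun lines code => lines ++ [entryLine m code])
            (lines ++ ["  Class " ++ c ++ ":"]))
        lines
      = lines ++ classBlocks m g := by
  intro n
  induction n with
  | zero =>
    intro g hlen _ lines
    have : g = [] := List.length_eq_zero_iff.mp (Nat.le_zero.mp hlen)
    subst this
    simp [classBlocks, PySem.Set.ofList]
  | succ k ih =>
    intro g hlen hpw lines
    cases g with
    | nil => simp [classBlocks, PySem.Set.ofList]
    | cons code rest =>
      have hmono : ∀ {a b : String}, a < b → cls3 a ≤ cls3 b := fun h => cls3_mono h
      rw [secs_cons hmono hpw, List.foldl_cons]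
      -- head class group
      have hgrp : (code :: rest).filter (fun x => cls3 x == cls3 code)
          = code :: rest.takeWhile (fun x => cls3 x == cls3 code) := filter_head_group hmono hpw
      rw [hgrp]
      have hgc : PySem.List.sorted
          (PySem.Set.ofList (code :: rest.takeWhile (fun x => cls3 x == cls3 code))) (fun x => x) false
          = code :: rest.takeWhile (fun x => cls3 x == cls3 code) := by
        apply sorted_ofList_eq
        · exact ((List.Pairwise.sublist
            (List.cons_sublist_cons.mpr (List.takeWhile_sublist _)) hpw).imp (fun h => ne_of_lt h))
        · exact List.Pairwise.sublist (List.cons_sublist_cons.mpr (List.takeWhile_sublist _)) hpw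
        · intro a; rfl
      rw [hgc, PySem.List.foldl_append_singleton_eq_map]
      -- remaining classes: rewrite the filter to the dropWhile part, then IH
      rw [PySem.List.foldl_congr_mem _ _
        (fun lines c =>
          (PySem.List.sorted (PySem.Set.ofList
            ((rest.dropWhile (fun x => cls3 x == cls3 code)).filter (fun x => cls3 x == c))) (fun x => x) false).foldl
            (fun lines code => lines ++ [entryLine m code])
            (lines ++ ["  Class " ++ c ++ ":"])) _ ?hcongr]
      case hcongr =>
        intro acc c hc
        rw [PySem.List.mem_sorted, PySem.Set.mem_ofList] at hc
        rcases List.mem_map.mp hc with ⟨x, hx, hfx⟩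
        have hne : c ≠ cls3 code := by
          rw [← hfx]
          exact ne_of_gt (rest_gt hmono hpw x hx)
        rw [filter_rest hne]
      have hpwd : (rest.dropWhile (fun x => cls3 x == cls3 code)).Pairwise (· < ·) :=
        List.Pairwise.sublist (List.dropWhile_sublist _) hpw.of_cons
      have hlend : (rest.dropWhile (fun x => cls3 x == cls3 code)).length ≤ k := by
        have h1 := List.length_dropWhile_le (fun x => cls3 x == cls3 code) rest
        have h2 : rest.length + 1 ≤ k + 1 := by simpa using hlen
        omega
      rw [ih _ hlend hpwd]
      rw [classBlocks]
      simp [codeLines]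
theorem aSecFold (m : List (String × String)) :
    ∀ (n : Nat) (S : List String), S.length ≤ n → S.Pairwise (· < ·) → ∀ (lines : List String),
      (PySem.List.sorted (PySem.Set.ofList (S.map sec1)) (fun x => x) false).foldl
        (fun lines s =>
          ((PySem.List.sorted (PySem.Set.ofList ((S.filter (fun x => sec1 x == s)).map cls3)) (fun x => x) false).foldl
            (fun lines c =>
              (PySem.List.sorted (PySem.Set.ofList ((S.filter (fun x => sec1 x == s)).filter (fun x => cls3 x == c))) (fun x => x) false).foldl
                (fun lines code => lines ++ [entryLine m code])
                (lines ++ ["  Class " ++ c ++ ":"]))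
            (lines ++ ["Section " ++ s ++ ":"])) ++ [""])
        lines
      = lines ++ (secBlocks m S).flatMap (fun b => b ++ [""]) := by
  intro n
  induction n with
  | zero =>
    intro S hlen _ lines
    have : S = [] := List.length_eq_zero_iff.mp (Nat.le_zero.mp hlen)
    subst this
    simp [secBlocks, PySem.Set.ofList]
  | succ k ih =>
    intro S hlen hpw lines
    cases S with
    | nil => simp [secBlocks, PySem.Set.ofList]
    | cons code rest =>
      have hmono : ∀ {a b : String}, a < b → sec1 a ≤ sec1 b := fun h => sec1_mono h
      rw [secs_cons hmono hpw, List.foldl_cons]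
      have hgrp : (code :: rest).filter (fun x => sec1 x == sec1 code)
          = code :: rest.takeWhile (fun x => sec1 x == sec1 code) := filter_head_group hmono hpw
      rw [hgrp]
      have hpwg : (code :: rest.takeWhile (fun x => sec1 x == sec1 code)).Pairwise (· < ·) :=
        List.Pairwise.sublist (List.cons_sublist_cons.mpr (List.takeWhile_sublist _)) hpw
      rw [aClassFold m (code :: rest.takeWhile (fun x => sec1 x == sec1 code)).length _ (le_refl _) hpwg]
      rw [PySem.List.foldl_congr_mem _ _
        (fun lines s =>
          ((PySem.List.sorted (PySem.Set.ofList
              (((rest.dropWhile (fun x => sec1 x == sec1 code)).filter (fun x => sec1 x == s)).map cls3)) (fun x => x) false).foldl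
            (fun lines c =>
              (PySem.List.sorted (PySem.Set.ofList
                (((rest.dropWhile (fun x => sec1 x == sec1 code)).filter (fun x => sec1 x == s)).filter (fun x => cls3 x == c))) (fun x => x) false).foldl
                (fun lines code => lines ++ [entryLine m code])
                (lines ++ ["  Class " ++ c ++ ":"]))
            (lines ++ ["Section " ++ s ++ ":"])) ++ [""]) _ ?hcongr]
      case hcongr =>
        intro acc s hs
        rw [PySem.List.mem_sorted, PySem.Set.mem_ofList] at hs
        rcases List.mem_map.mp hs with ⟨x, hx, hfx⟩
        have hne : s ≠ sec1 code := by
          rw [← hfx]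
          exact ne_of_gt (rest_gt hmono hpw x hx)
        rw [filter_rest hne]
      have hpwd : (rest.dropWhile (fun x => sec1 x == sec1 code)).Pairwise (· < ·) :=
        List.Pairwise.sublist (List.dropWhile_sublist _) hpw.of_cons
      have hlend : (rest.dropWhile (fun x => sec1 x == sec1 code)).length ≤ k := by
        have h1 := List.length_dropWhile_le (fun x => sec1 x == sec1 code) rest
        have h2 : rest.length + 1 ≤ k + 1 := by simpa using hlen
        omega
      rw [ih _ hlend hpwd]
      rw [secBlocks]
      simp
theorem scanStep_same (m : List (String × String)) (lines : List String) (s c : String) (code : String)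
    (h1 : sec1 code = s) (h2 : cls3 code = c) :
    scanStep m (lines, s, c) code = (lines ++ [entryLine m code], s, c) := by
  rw [scanStep]
  simp only [sec1] at h1
  simp only [cls3] at h2
  simp [h1, h2, entryLine]

theorem scanStep_newClass (m : List (String × String)) (lines : List String) (s c : String) (code : String)
    (h1 : sec1 code = s) (h2 : cls3 code ≠ c) :
    scanStep m (lines, s, c) code
      = (lines ++ ["  Class " ++ cls3 code ++ ":", entryLine m code], s, cls3 code) := by
  rw [scanStep]
  simp only [sec1] at h1
  simp only [cls3] at h2
  simp [h1, h2, entryLine, cls3]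

theorem scanStep_newSection (m : List (String × String)) (lines : List String) (cs cc : String) (code : String)
    (h1 : sec1 code ≠ cs) (h2 : cls3 code ≠ "") :
    scanStep m (lines, cs, cc) code
      = ((if lines ≠ [] then lines ++ [""] else lines)
          ++ ["Section " ++ sec1 code ++ ":", "  Class " ++ cls3 code ++ ":", entryLine m code],
         sec1 code, cls3 code) := by
  rw [scanStep]
  simp only [sec1] at h1
  simp only [cls3] at h2
  simp [h1, h2, entryLine, sec1, cls3]
theorem scanCodes (m : List (String × String)) (s c : String) :
    ∀ (gc : List String), (∀ x ∈ gc, sec1 x = s) → (∀ x ∈ gc, cls3 x = c) →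
      ∀ (lines : List String),
        gc.foldl (scanStep m) (lines, s, c) = (lines ++ codeLines m gc, s, c) := by
  intro gc
  induction gc with
  | nil => intro _ _ lines; simp [codeLines]
  | cons x t ih =>
    intro hs hc lines
    rw [List.foldl_cons, scanStep_same m lines s c x (hs x List.mem_cons_self) (hc x List.mem_cons_self)]
    rw [ih (fun y hy => hs y (List.mem_cons_of_mem _ hy)) (fun y hy => hc y (List.mem_cons_of_mem _ hy))]
    simp [codeLines]

theorem scanClasses (m : List (String × String)) (s : String) :
    ∀ (n : Nat) (g : List String), g.length ≤ n → g.Pairwise (· < ·) → (∀ x ∈ g, sec1 x = s) →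
      ∀ (cc : String), (∀ x ∈ g, cls3 x ≠ cc) →
      ∀ (lines : List String),
        ∃ cc', g.foldl (scanStep m) (lines, s, cc) = (lines ++ classBlocks m g, s, cc') := by
  intro n
  induction n with
  | zero =>
    intro g hlen _ _ cc _ lines
    have : g = [] := List.length_eq_zero_iff.mp (Nat.le_zero.mp hlen)
    subst this
    exact ⟨cc, by simp [classBlocks]⟩
  | succ k ih =>
    intro g hlen hpw hsec cc hcls lines
    cases g with
    | nil => exact ⟨cc, by simp [classBlocks]⟩
    | cons code rest =>
      have hmono : ∀ {a b : String}, a < b → cls3 a ≤ cls3 b := fun h => cls3_mono h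
      rw [List.foldl_cons,
        scanStep_newClass m lines s cc code (hsec code List.mem_cons_self) (hcls code List.mem_cons_self)]
      -- the rest of code's class group
      have htw := List.takeWhile_append_dropWhile (p := fun x => cls3 x == cls3 code) (l := rest)
      rw [← htw, List.foldl_append]
      have hcodes := scanCodes m s (cls3 code) (rest.takeWhile (fun x => cls3 x == cls3 code))
        (fun y hy => hsec y (List.mem_cons_of_mem _ ((List.takeWhile_sublist _).mem hy)))
        (fun y hy => beq_iff_eq.mp (List.mem_takeWhile_imp (p := fun x => cls3 x == cls3 code) hy))
        (lines ++ ["  Class " ++ cls3 code ++ ":", entryLine m code])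
      rw [hcodes]
      -- the remaining class groups
      have hpwd : (rest.dropWhile (fun x => cls3 x == cls3 code)).Pairwise (· < ·) :=
        List.Pairwise.sublist (List.dropWhile_sublist _) hpw.of_cons
      have hlend : (rest.dropWhile (fun x => cls3 x == cls3 code)).length ≤ k := by
        have h1 := List.length_dropWhile_le (fun x => cls3 x == cls3 code) rest
        have h2 : rest.length + 1 ≤ k + 1 := by simpa using hlen
        omega
      rcases ih _ hlend hpwd
        (fun y hy => hsec y (List.mem_cons_of_mem _ ((List.dropWhile_sublist _).mem hy)))
        (cls3 code)
        (fun y hy => ne_of_gt (rest_gt hmono hpw y hy))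
        (lines ++ ["  Class " ++ cls3 code ++ ":", entryLine m code] ++ codeLines m (rest.takeWhile (fun x => cls3 x == cls3 code)))
        with ⟨cc', hcc'⟩
      refine ⟨cc', ?_⟩
      rw [hcc', classBlocks]
      simp [codeLines]
theorem secBlocks_eq_nil (m : List (String × String)) (l : List String) :
    secBlocks m l = [] ↔ l = [] := by
  cases l with
  | nil => simp [secBlocks]
  | cons a t => simp [secBlocks]

theorem scanSections (m : List (String × String)) :
    ∀ (n : Nat) (S : List String), S.length ≤ n → S.Pairwise (· < ·) → (∀ x ∈ S, x ≠ "") →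
      ∀ (cs : String), (∀ x ∈ S, sec1 x ≠ cs) →
      ∀ (cc : String) (lines : List String),
        (S.foldl (scanStep m) (lines, cs, cc)).1
          = lines ++ (if S = [] then [] else
              (if lines = [] then [] else [""]) ++ sepJoin (secBlocks m S)) := by
  intro n
  induction n with
  | zero =>
    intro S hlen _ _ cs _ cc lines
    have : S = [] := List.length_eq_zero_iff.mp (Nat.le_zero.mp hlen)
    subst this
    simp
  | succ k ih =>
    intro S hlen hpw hne cs hcs cc lines
    cases S with
    | nil => simp
    | cons code rest =>
      have hmonoS : ∀ {a b : String}, a < b → sec1 a ≤ sec1 b := fun h => sec1_mono h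
      have hmonoC : ∀ {a b : String}, a < b → cls3 a ≤ cls3 b := fun h => cls3_mono h
      rw [List.foldl_cons,
        scanStep_newSection m lines cs cc code (hcs code List.mem_cons_self)
          (cls3_ne_empty (hne code List.mem_cons_self))]
      set s0 := sec1 code with hs0
      set tw := rest.takeWhile (fun x => sec1 x == s0) with htwdef
      set dw := rest.dropWhile (fun x => sec1 x == s0) with hdwdef
      have hrest : rest = tw ++ dw := (List.takeWhile_append_dropWhile).symm
      have hsecg : ∀ x ∈ code :: tw, sec1 x = s0 := by
        intro x hx
        rcases List.mem_cons.mp hx with h | h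
        · rw [h]
        · exact beq_iff_eq.mp (List.mem_takeWhile_imp (p := fun x => sec1 x == s0) h)
      have hpwg : (code :: tw).Pairwise (· < ·) :=
        List.Pairwise.sublist (List.cons_sublist_cons.mpr (List.takeWhile_sublist _)) hpw
      -- split the head section group by class
      set tw1 := tw.takeWhile (fun x => cls3 x == cls3 code) with htw1
      set tw2 := tw.dropWhile (fun x => cls3 x == cls3 code) with htw2
      have htwsplit : tw = tw1 ++ tw2 := (List.takeWhile_append_dropWhile).symm
      conv_lhs => rw [hrest, htwsplit, List.append_assoc, List.foldl_append, List.foldl_append]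
      set lines0 := if lines ≠ [] then lines ++ [""] else lines with hlines0
      rw [scanCodes m s0 (cls3 code) tw1
        (fun y hy => hsecg y (List.mem_cons_of_mem _ ((List.takeWhile_sublist _).mem hy)))
        (fun y hy => beq_iff_eq.mp (List.mem_takeWhile_imp (p := fun x => cls3 x == cls3 code) hy)) _]
      rcases scanClasses m s0 tw2.length tw2 (le_refl _)
        (List.Pairwise.sublist (List.dropWhile_sublist _) hpwg.of_cons)
        (fun y hy => hsecg y (List.mem_cons_of_mem _ ((List.dropWhile_sublist _).mem hy)))
        (cls3 code)
        (fun y hy => ne_of_gt (rest_gt hmonoC hpwg y hy))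
        (lines0 ++ ["Section " ++ s0 ++ ":", "  Class " ++ cls3 code ++ ":", entryLine m code] ++ codeLines m tw1)
        with ⟨cc1, hcc1⟩
      rw [hcc1]
      -- now the remaining sections
      have hpwd : dw.Pairwise (· < ·) := List.Pairwise.sublist (List.dropWhile_sublist _) hpw.of_cons
      have hlend : dw.length ≤ k := by
        have h1 := List.length_dropWhile_le (fun x => sec1 x == s0) rest
        have h2 : rest.length + 1 ≤ k + 1 := by simpa using hlen
        rw [hdwdef]
        omega
      have hned : ∀ x ∈ dw, x ≠ "" := fun x hx =>
        hne x (List.mem_cons_of_mem _ ((List.dropWhile_sublist _).mem hx))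
      have hcsd : ∀ x ∈ dw, sec1 x ≠ s0 := fun x hx => ne_of_gt (rest_gt hmonoS hpw x hx)
      rw [ih dw hlend hpwd hned s0 hcsd cc1 _]
      -- assemble
      have hblocks : secBlocks m (code :: rest)
          = (("Section " ++ s0 ++ ":") :: classBlocks m (code :: tw)) :: secBlocks m dw := by
        rw [secBlocks]
      have hclsg : classBlocks m (code :: tw)
          = ("  Class " ++ cls3 code ++ ":") :: (codeLines m (code :: tw1) ++ classBlocks m tw2) := by
        rw [classBlocks]
      rw [hblocks, hclsg]
      have hB1ne : (lines0 ++ ["Section " ++ s0 ++ ":", "  Class " ++ cls3 code ++ ":", entryLine m code]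
          ++ codeLines m tw1 ++ classBlocks m tw2) ≠ [] := by
        simp
      rw [if_neg hB1ne]
      by_cases hdw : dw = []
      · rw [if_pos hdw, hdw, show secBlocks m [] = [] from by simp [secBlocks]]
        by_cases hl : lines = []
        · simp [hlines0, hl, sepJoin, codeLines]
        · simp [hlines0, hl, sepJoin, codeLines]
      · obtain ⟨d1, dt, hdd⟩ : ∃ d1 dt, dw = d1 :: dt := by
          cases hdw2 : dw with
          | nil => exact absurd hdw2 hdw
          | cons d1 dt => exact ⟨d1, dt, rfl⟩
        rw [if_neg hdw, hdd, secBlocks]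
        by_cases hl : lines = []
        · simp [hlines0, hl, sepJoin, codeLines]
        · simp [hlines0, hl, sepJoin, codeLines]
theorem sepJoin_terminated : ∀ (blocks : List (List String)), blocks ≠ [] →
    blocks.flatMap (fun b => b ++ [""]) = sepJoin blocks ++ [""] := by
  intro blocks
  induction blocks with
  | nil => intro h; exact absurd rfl h
  | cons b bs ih =>
    intro _
    cases bs with
    | nil => simp [sepJoin]
    | cons b' bs' =>
      rw [List.flatMap_cons, ih (by simp), sepJoin]
      simp
theorem chars_join_append_nil (nl : List Char) : ∀ (xs : List (List Char)),
    PySem.Chars.join nl (xs ++ [[]])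
      = if xs = [] then [] else PySem.Chars.join nl xs ++ nl := by
  intro xs
  induction xs with
  | nil => simp [PySem.Chars.join_singleton]
  | cons x t ih =>
    cases t with
    | nil =>
      rw [List.singleton_append, PySem.Chars.join_cons_cons, PySem.Chars.join_singleton,
        PySem.Chars.join_singleton]
      simp
    | cons y t' =>
      have h1 : (x :: y :: t') ++ [[]] = x :: ((y :: t') ++ [[]]) := by simp
      have h2 : (y :: t') ++ [[]] = y :: (t' ++ [[]]) := by simp
      rw [h1, h2, PySem.Chars.join_cons_cons, ← h2, ih]
      simp [PySem.Chars.join_cons_cons]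

theorem chars_rstrip_newline (x : List Char) :
    PySem.Chars.rstrip (x ++ ['\n']) = PySem.Chars.rstrip x := by
  simp [PySem.Chars.rstrip, show PySem.Chars.isspace '\n' = true from rfl]

theorem chars_strip_newline (x : List Char) :
    PySem.Chars.strip (x ++ ['\n']) = PySem.Chars.strip x := by
  have hs : ∀ cs : List Char, PySem.Chars.strip cs = PySem.Chars.rstrip (PySem.Chars.lstrip cs) := by
    intro cs
    simp [PySem.Chars.strip, PySem.Chars.rstrip, PySem.Chars.lstrip]
  have hl : ∀ cs : List Char, PySem.Chars.lstrip cs = List.dropWhile PySem.Chars.isspace cs := by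
    intro cs
    simp [PySem.Chars.lstrip]
  rw [hs, hs, hl, hl, List.dropWhile_append]
  by_cases he : (List.dropWhile PySem.Chars.isspace x).isEmpty
  · rw [if_pos he]
    rw [List.isEmpty_iff] at he
    rw [he]
    simp [show PySem.Chars.isspace '\n' = true from rfl, PySem.Chars.rstrip]
  · rw [if_neg he]
    exact chars_rstrip_newline _
theorem strip_join_append_empty (l : List String) :
    PySem.Str.strip (PySem.Str.join "\n" (l ++ [""])) = PySem.Str.strip (PySem.Str.join "\n" l) := by
  rw [str_eq_iff_toList, PySem.Str.toList_strip, PySem.Str.toList_strip,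
    PySem.Str.toList_join, PySem.Str.toList_join, List.map_append]
  have : (List.map String.toList [""]) = [[]] := rfl
  rw [this, chars_join_append_nil]
  by_cases h : List.map String.toList l = []
  · rw [if_pos h, h]
    rw [PySem.Chars.join_nil]
  · rw [if_neg h]
    exact chars_strip_newline _
theorem portA_eq (al : List String) (m : List (String × String)) :
    group_allowed_labels_hierarchically al m
      = PySem.Str.strip (PySem.Str.join "\n"
          ((secBlocks m (PySem.List.sorted
              (PySem.Set.ofList ((al.map nrmStr).filter (fun c => c ≠ "")))
              (fun x => x) false)).flatMap (fun b => b ++ [""]))) := by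
  set L := (al.map nrmStr).filter (fun c => c ≠ "") with hL
  set S := PySem.List.sorted (PySem.Set.ofList L) (fun x => x) false with hS
  have hSmem : ∀ x, x ∈ S ↔ x ∈ L := by
    intro x
    rw [hS, PySem.List.mem_sorted, PySem.Set.mem_ofList]
  have hLne : ∀ x ∈ L, x ≠ "" := by
    intro x hx
    have := (List.mem_filter.mp hx).2
    simpa using this
  have hSpw : S.Pairwise (· < ·) := PySem.List.sorted_ofList_pairwise_lt L
  simp only [group_allowed_labels_hierarchically]
  -- step 1: the tree fold is the filtered fold
  have hlam : (fun (tree : PySem.Dict String (PySem.Dict String (List String))) raw_code =>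
      let code := normalize_cpc_label raw_code
      if code = "" then tree
      else
        let sect := (match PySem.Str.pyGet? code 0 with | some ch => String.ofList [ch] | none => "")
        let cclass := PySem.Str.slice code none (some 3)
        tree.modify sect PySem.Dict.empty (fun inner => inner.modify cclass [] (fun l => l ++ [code])))
      = (fun t r => if nrmStr r = "" then t else treeStep t (nrmStr r)) := by
    funext t r
    show (let code := normalize_cpc_label r
      if code = "" then t
      else
        let sect := (match PySem.Str.pyGet? code 0 with | some ch => String.ofList [ch] | none => "")
        let cclass := PySem.Str.slice code none (some 3)
        t.modify sect PySem.Dict.empty (fun inner => inner.modify cclass [] (fun l => l ++ [code])))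
      = _
    rw [show normalize_cpc_label r = nrmStr r from normalize_eq_nrm r]
    generalize nrmStr r = y
    rfl
  rw [hlam, foldl_norm_filter, ← hL]
  -- step 2: the outer key list
  rw [tree_keys, List.map_congr_left (fun x hx => secA_eq_sec1 (hLne x hx))]
  have hsecmem : ∀ a, a ∈ L.map sec1 ↔ a ∈ S.map sec1 := by
    intro a
    simp only [List.mem_map]
    exact ⟨fun ⟨x, hx, e⟩ => ⟨x, (hSmem x).mpr hx, e⟩, fun ⟨x, hx, e⟩ => ⟨x, (hSmem x).mp hx, e⟩⟩
  rw [sorted_ofList_congr hsecmem]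
  -- step 3: the bodies
  have hfiltmem : ∀ s x, x ∈ L.filter (fun c => secAKey c == s)
      ↔ x ∈ S.filter (fun c => sec1 c == s) := by
    intro s x
    simp only [List.mem_filter]
    constructor
    · rintro ⟨hx, he⟩
      rw [secA_eq_sec1 (hLne x hx)] at he
      exact ⟨(hSmem x).mpr hx, he⟩
    · rintro ⟨hx, he⟩
      have hxL := (hSmem x).mp hx
      rw [← secA_eq_sec1 (hLne x hxL)] at he
      exact ⟨hxL, he⟩
  have hsorted1 : ∀ s,
      PySem.List.sorted (PySem.Set.ofList ((L.filter (fun c => secAKey c == s)).map cls3)) (fun x => x) false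
        = PySem.List.sorted (PySem.Set.ofList ((S.filter (fun c => sec1 c == s)).map cls3)) (fun x => x) false := by
    intro s
    apply sorted_ofList_congr
    intro a
    simp only [List.mem_map]
    exact ⟨fun ⟨x, hx, e⟩ => ⟨x, (hfiltmem s x).mp hx, e⟩, fun ⟨x, hx, e⟩ => ⟨x, (hfiltmem s x).mpr hx, e⟩⟩
  have hsorted2 : ∀ s c,
      PySem.List.sorted (PySem.Set.ofList ((L.filter (fun x => secAKey x == s)).filter (fun x => cls3 x == c))) (fun x => x) false
        = PySem.List.sorted (PySem.Set.ofList ((S.filter (fun x => sec1 x == s)).filter (fun x => cls3 x == c))) (fun x => x) false := by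
    intro s c
    apply sorted_ofList_congr
    intro a
    constructor
    · intro h
      rcases List.mem_filter.mp h with ⟨hx, he⟩
      exact List.mem_filter.mpr ⟨(hfiltmem s a).mp hx, he⟩
    · intro h
      rcases List.mem_filter.mp h with ⟨hx, he⟩
      exact List.mem_filter.mpr ⟨(hfiltmem s a).mpr hx, he⟩
  simp only [tree_getD, PySem.Dict.getD_empty, inner_keys, inner_getD, List.nil_append,
    hsorted1, hsorted2]
  have hA := aSecFold m S.length S (le_refl _) hSpw []
  rw [List.nil_append] at hA
  exact congrArg (fun l => PySem.Str.strip (PySem.Str.join "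
" l)) hA
theorem portB_eq (al : List String) (m : List (String × String)) :
    group_allowed_labels_hierarchically_alt al m
      = PySem.Str.strip (PySem.Str.join "\n"
          (if (PySem.List.sorted (PySem.Set.ofList ((al.map nrmStr).filter (fun c => c ≠ "")))
              (fun x => x) false) = [] then []
           else sepJoin (secBlocks m (PySem.List.sorted
              (PySem.Set.ofList ((al.map nrmStr).filter (fun c => c ≠ "")))
              (fun x => x) false)))) := by
  set L := (al.map nrmStr).filter (fun c => c ≠ "") with hL
  set S := PySem.List.sorted (PySem.Set.ofList L) (fun x => x) false with hS
  have hSmem : ∀ x, x ∈ S ↔ x ∈ L := by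
    intro x
    rw [hS, PySem.List.mem_sorted, PySem.Set.mem_ofList]
  have hSne : ∀ x ∈ S, x ≠ "" := by
    intro x hx
    have := (List.mem_filter.mp ((hSmem x).mp hx)).2
    simpa using this
  have hSpw : S.Pairwise (· < ·) := PySem.List.sorted_ofList_pairwise_lt L
  simp only [group_allowed_labels_hierarchically_alt]
  rw [show (fun x => PySem.Str.slice (((PySem.Str.split? (PySem.Str.upper (PySem.Str.strip x)) "/").getD []).getD 0 "") none (some 4)) = nrmStr from rfl]
  rw [show (fun (st : List String × String × String) code =>
      let lines := st.1
      let cur_section := st.2.1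
      let cur_class := st.2.2
      let st1 : List String × String × String :=
        if PySem.Str.slice code none (some 1) ≠ cur_section then
          let lines := if lines ≠ [] then lines ++ [""] else lines
          (lines ++ ["Section " ++ PySem.Str.slice code none (some 1) ++ ":"], PySem.Str.slice code none (some 1), "")
        else (lines, cur_section, cur_class)
      let st2 : List String × String × String :=
        if PySem.Str.slice code none (some 3) ≠ st1.2.2 then
          (st1.1 ++ ["  Class " ++ PySem.Str.slice code none (some 3) ++ ":"], st1.2.1, PySem.Str.slice code none (some 3))
        else st1
      let d0 := (PySem.Dict.mk m).getD code ""
      let desc := PySem.Str.strip (if d0 = "" then "" else d0)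
      let desc := if 220 < PySem.Str.len desc then PySem.Str.rstrip (PySem.Str.slice desc none (some 220)) ++ "…" else desc
      (st2.1 ++ ["    - " ++ code ++ (if desc ≠ "" then " — " ++ desc else "")], st2.2.1, st2.2.2))
    = scanStep m from rfl]
  rw [scanSections m S.length S (le_refl _) hSpw hSne "" (fun x hx => sec1_ne_empty (hSne x hx)) "" []]
  simp
theorem ports_agree (al : List String) (m : List (String × String)) :
    group_allowed_labels_hierarchically al m = group_allowed_labels_hierarchically_alt al m := by
  rw [portA_eq, portB_eq]
  set S := PySem.List.sorted (PySem.Set.ofList ((al.map nrmStr).filter (fun c => c ≠ "")))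
    (fun x => x) false with hS
  by_cases h : S = []
  · rw [if_pos h, h, show secBlocks m [] = [] from by simp [secBlocks]]
    rfl
  · rw [if_neg h]
    rw [sepJoin_terminated _ (fun hc => h ((secBlocks_eq_nil m S).mp hc))]
    exact strip_join_append_empty _

-- ===== VERDICT (by name: the statement is the Claim_ definition above) =====
theorem group_allowed_labels_hierarchically_spec : Claim_equal_group_allowed_labels_hierarchically := by
  intro allowed_labels cpc_desc_map _
  unfold Spec_group_allowed_labels_hierarchically
  exact ports_agree allowed_labels cpc_desc_map
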